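-- pv_equiv track=rewrite | github.com/StarAbhi/StarAbhi | string/subString.py | solution
-- ===== SOURCE A (Python) =====
-- def solution(s):
--     d={}
--     for i in range(0,len(s)):
--         e=i
--         for j in range(1,len(s)):
--             if(s[i]==s[j]):
--                 e=j
--         if s[i] not in d:
--             d[s[i]]=[i,e]
--         else:
--             if (d[s[i]][1]-d[s[i]][0])<(e-i):
--                 d[s[i]][0]=i
--                 d[s[i]][1]=e
--     temp=0
--     max=None
--     for k in d:
--         if d[k][1]-d[k][0]>temp:
--             max=k
--             temp=d[k][1]-d[k][0]
--     if max==None: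
--         result=s[0]
--     else:
--         result=s[d[max][0]:1+d[max][1]]
--     return result
-- ===== SOURCE B (Python) =====
-- def solution(s):
--     first = {}
--     last = {}
--     for i in range(len(s)):
--         c = s[i]
--         if c not in first:
--             first[c] = i
--         last[c] = i
--     best = None
--     span = 0
--     for c in first:
--         w = last[c] - first[c]
--         if w > span:
--             span = w
--             best = c
--     if best is None:
--         return s[0]
--     return s[first[best]:last[best] + 1]
-- ===== Notes on version B (the rewrite author's own statement) =====
-- stated objective: faster
-- what changed: Replaces A's nested scan (for every position, rescanning the whole string for the last matching index) with a single pass recording each character's first and last index in two dicts, then picking the max span.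
import Mathlib
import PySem

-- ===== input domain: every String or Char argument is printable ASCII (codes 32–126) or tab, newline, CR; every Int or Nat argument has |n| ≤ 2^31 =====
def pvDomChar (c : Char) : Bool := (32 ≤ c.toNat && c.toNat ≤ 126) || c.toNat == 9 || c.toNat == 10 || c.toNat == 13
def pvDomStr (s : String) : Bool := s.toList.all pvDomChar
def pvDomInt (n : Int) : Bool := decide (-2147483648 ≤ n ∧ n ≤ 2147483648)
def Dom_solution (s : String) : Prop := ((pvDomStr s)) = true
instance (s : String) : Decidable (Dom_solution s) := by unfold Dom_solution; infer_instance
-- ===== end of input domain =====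

-- B makes a single pass recording each character's first/last index instead of A's
-- rescan of the whole string at every position; neither mutates its argument.

-- ===== PORT A =====
-- inner loop 'for j in range(1,len(s)): if s[i]==s[j]: e=j'  (n = len(s))
def innerE (cs : List Char) (n i : Int) : Int :=
  (PySem.List.pyRange 1 n).foldl
    (fun e j => if PySem.List.pyGetD cs i ' ' = PySem.List.pyGetD cs j ' ' then j else e) i

-- one iteration of A's outer loop body; the two element mutations d[c][0]=i, d[c][1]=e
-- together overwrite the stored pair, which 'insert' does (key position kept)
def stepA (cs : List Char) (n : Int) (d : PySem.Dict Char (Int × Int)) (i : Int) :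
    PySem.Dict Char (Int × Int) :=
  let e := innerE cs n i
  let c := PySem.List.pyGetD cs i ' '
  if d.contains c = false then d.insert c (i, e)
  else
    let p := d.getD c (0, 0)
    if p.2 - p.1 < e - i then d.insert c (i, e) else d

-- one iteration of 'for k in d: if d[k][1]-d[k][0]>temp: max=k; temp=...', state (temp, max)
def selA (d : PySem.Dict Char (Int × Int)) (tm : Int × Option Char) (k : Char) :
    Int × Option Char :=
  let p := d.getD k (0, 0)
  if p.2 - p.1 > tm.1 then (p.2 - p.1, some k) else tm

def solution (s : String) : String :=
  let cs := s.toList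
  let n : Int := (cs.length : Int)
  let d := (PySem.List.pyRange 0 n).foldl (stepA cs n) PySem.Dict.empty
  let tm := d.keys.foldl (selA d) ((0 : Int), (none : Option Char))
  match tm.2 with
  | none =>
      -- result = s[0]; none = IndexError on the empty string, excluded by Pre_
      match PySem.List.pyGet? cs 0 with
      | some c => String.ofList [c]
      | none => ""
  | some m =>
      let p := d.getD m (0, 0)
      String.ofList (PySem.List.slice cs (some p.1) (some (1 + p.2)))

-- ===== PORT B =====
-- 'if c not in first: first[c] = i'
def stepFirst (cs : List Char) (f : PySem.Dict Char Int) (i : Int) : PySem.Dict Char Int :=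
  let c := PySem.List.pyGetD cs i ' '
  if f.contains c = false then f.insert c i else f

-- 'last[c] = i'
def stepLast (cs : List Char) (l : PySem.Dict Char Int) (i : Int) : PySem.Dict Char Int :=
  l.insert (PySem.List.pyGetD cs i ' ') i

-- one iteration of B's selection loop, state (span, best)
def selB (f l : PySem.Dict Char Int) (sb : Int × Option Char) (c : Char) :
    Int × Option Char :=
  let w := l.getD c 0 - f.getD c 0
  if w > sb.1 then (w, some c) else sb

def solution_alt (s : String) : String :=
  let cs := s.toList
  let n : Int := (cs.length : Int)
  let fl := (PySem.List.pyRange 0 n).foldl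
    (fun st i => (stepFirst cs st.1 i, stepLast cs st.2 i))
    ((PySem.Dict.empty : PySem.Dict Char Int), (PySem.Dict.empty : PySem.Dict Char Int))
  let sb := fl.1.keys.foldl (selB fl.1 fl.2) ((0 : Int), (none : Option Char))
  match sb.2 with
  | none =>
      match PySem.List.pyGet? cs 0 with
      | some c => String.ofList [c]
      | none => ""
  | some b =>
      String.ofList (PySem.List.slice cs (some (fl.1.getD b 0)) (some (fl.2.getD b 0 + 1)))

-- ===== PRECONDITION & SPEC =====
-- A raises IndexError (s[0]) on the empty string; it returns normally everywhere else.
def Pre_solution (s : String) : Prop := s ≠ ""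
instance (s : String) : Decidable (Pre_solution s) := by unfold Pre_solution; infer_instance
def pvWitness_solution : String := "abca"

def Spec_solution (s : String) (out : String) : Prop := out = solution_alt s
instance (s : String) (out : String) : Decidable (Spec_solution s out) := by
  unfold Spec_solution; infer_instance

-- ===== CLAIM (what is proved, stated in full; the proofs are below) =====
def Claim_equal_solution : Prop :=
  ∀ (s : String), Dom_solution s → Pre_solution s → Spec_solution s (solution s)

-- ===== LEMMAS AND PROOFS =====

-- first index of c among cs[0..m) (junk value 0 when absent)
def fIa (cs : List Char) (c : Char) : Nat → Int
  | 0 => 0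
  | m + 1 => if c = cs.getD m ' ' ∧ c ∉ cs.take m then (m : Int) else fIa cs c m

-- last index of c among cs[0..m) (junk value 0 when absent)
def lIa (cs : List Char) (c : Char) : Nat → Int
  | 0 => 0
  | m + 1 => if c = cs.getD m ' ' then (m : Int) else lIa cs c m

-- value of A's inner loop over range(1,m) with default k
def eA (cs : List Char) (c : Char) (k : Int) : Nat → Int
  | 0 => k
  | 1 => k
  | m + 2 => if c = cs.getD (m + 1) ' ' then ((m + 1 : Nat) : Int) else eA cs c k (m + 1)

-- canonical selection step shared by both ports once the dicts are rewritten away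
def selStep (cs : List Char) (n : Nat) (tm : Int × Option Char) (k : Char) :
    Int × Option Char :=
  if lIa cs k n - fIa cs k n > tm.1 then (lIa cs k n - fIa cs k n, some k) else tm

lemma take_succ_getD (cs : List Char) (m : Nat) (hm : m < cs.length) :
    cs.take (m + 1) = cs.take m ++ [cs.getD m ' '] := by
  rw [List.take_add_one, List.getElem?_eq_getElem hm, List.getD_eq_getElem cs ' ' hm]
  simp

lemma set_ofList_append_singleton {α : Type} [BEq α] (l : List α) (c : α) :
    PySem.Set.ofList (l ++ [c]) = PySem.Set.add (PySem.Set.ofList l) c := by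
  simp [PySem.Set.ofList_eq_foldl, List.foldl_append]

lemma set_add_of_mem {α : Type} [BEq α] [LawfulBEq α] (s : PySem.Set α) (c : α)
    (h : c ∈ s) : PySem.Set.add s c = s := by
  simp [PySem.Set.add, PySem.Set.contains, h]

lemma set_add_of_not_mem {α : Type} [BEq α] [LawfulBEq α] (s : PySem.Set α) (c : α)
    (h : ¬ c ∈ s) : PySem.Set.add s c = s ++ [c] := by
  simp [PySem.Set.add, PySem.Set.contains, h]

lemma pyRange_zero_succ (m : Nat) :
    PySem.List.pyRange 0 ((m + 1 : Nat) : Int)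
      = PySem.List.pyRange 0 (m : Int) ++ [(m : Int)] := by
  have h : ((m + 1 : Nat) : Int) = (m : Int) + 1 := by push_cast; ring
  rw [h, PySem.List.pyRange_one_succ_right (Int.natCast_nonneg m)]

lemma innerE_eq_eA (cs : List Char) (m : Nat) (k : Int) :
    innerE cs (m : Int) k = eA cs (PySem.List.pyGetD cs k ' ') k m := by
  unfold innerE
  induction m with
  | zero => rfl
  | succ m ih =>
    cases m with
    | zero => rfl
    | succ m' =>
      have h : ((m' + 1 + 1 : Nat) : Int) = ((m' + 1 : Nat) : Int) + 1 := by push_cast; ring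
      rw [h, PySem.List.pyRange_one_succ_right
        (by exact_mod_cast Nat.succ_le_succ (Nat.zero_le m')), List.foldl_append]
      rw [ih]
      simp only [List.foldl_cons, List.foldl_nil, eA, PySem.List.pyGetD_natCast]

lemma eA_eq_lIa (cs : List Char) (c : Char) (k : Nat) (hk : cs.getD k ' ' = c) :
    ∀ (m : Nat), k < m → eA cs c (k : Int) m = lIa cs c m := by
  intro m
  induction m with
  | zero => omega
  | succ m ih =>
    intro hkm
    rcases Nat.lt_succ_iff_lt_or_eq.mp hkm with h | h
    · cases m with
      | zero => omega
      | succ m' =>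
        rw [show eA cs c (k : Int) (m' + 1 + 1)
              = if c = cs.getD (m' + 1) ' ' then ((m' + 1 : Nat) : Int)
                else eA cs c (k : Int) (m' + 1) from rfl,
            show lIa cs c (m' + 1 + 1)
              = if c = cs.getD (m' + 1) ' ' then ((m' + 1 : Nat) : Int)
                else lIa cs c (m' + 1) from rfl]
        split_ifs with hc
        · rfl
        · exact ih h
    · subst h
      cases k with
      | zero => simp [eA, lIa, ← hk]
      | succ k' => simp [eA, lIa, ← hk]

lemma fIa_lt (cs : List Char) (c : Char) :
    ∀ (m : Nat), c ∈ cs.take m → fIa cs c m < (m : Int) := by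
  intro m
  induction m with
  | zero => intro h; simp at h
  | succ m ih =>
    intro h
    by_cases hlen : m < cs.length
    · rw [take_succ_getD cs m hlen] at h
      simp only [fIa]
      split_ifs with hc
      · exact_mod_cast Nat.lt_succ_self m
      · have hcm : c ∈ cs.take m := by
          rcases List.mem_append.mp h with h' | h'
          · exact h'
          · by_contra hno
            exact hc ⟨by simpa using h', hno⟩
        exact lt_trans (ih hcm) (by exact_mod_cast Nat.lt_succ_self m)
    · have hts : cs.take (m + 1) = cs.take m := by
        rw [List.take_of_length_le (by omega), List.take_of_length_le (by omega)]
      rw [hts] at h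
      simp only [fIa]
      split_ifs with hc
      · exact_mod_cast Nat.lt_succ_self m
      · exact lt_trans (ih h) (by exact_mod_cast Nat.lt_succ_self m)

lemma lastInv (cs : List Char) :
    ∀ (m : Nat), m ≤ cs.length → ∀ c ∈ cs.take m,
      ((PySem.List.pyRange 0 (m : Int)).foldl (stepLast cs) PySem.Dict.empty).getD c 0
        = lIa cs c m := by
  intro m
  induction m with
  | zero => intro _ c hc; simp at hc
  | succ m ih =>
    intro hm c hc
    have hml : m < cs.length := hm
    rw [pyRange_zero_succ, List.foldl_append]
    simp only [List.foldl_cons, List.foldl_nil, stepLast, PySem.List.pyGetD_natCast]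
    rw [PySem.Dict.getD_insert]
    rw [take_succ_getD cs m hml] at hc
    simp only [lIa]
    split_ifs with hceq
    · rfl
    · apply ih (by omega) c
      rcases List.mem_append.mp hc with h | h
      · exact h
      · exact absurd (by simpa using h) hceq

lemma firstInv (cs : List Char) :
    ∀ (m : Nat), m ≤ cs.length →
      ((PySem.List.pyRange 0 (m : Int)).foldl (stepFirst cs) PySem.Dict.empty).keys
          = PySem.Set.ofList (cs.take m)
        ∧ ∀ c ∈ cs.take m,
          ((PySem.List.pyRange 0 (m : Int)).foldl (stepFirst cs) PySem.Dict.empty).get? c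
            = some (fIa cs c m) := by
  intro m
  induction m with
  | zero =>
    intro _
    constructor
    · rfl
    · intro c hc; simp at hc
  | succ m ih =>
    intro hm
    have hml : m < cs.length := hm
    obtain ⟨ihk, ihv⟩ := ih (by omega)
    rw [pyRange_zero_succ, List.foldl_append]
    simp only [List.foldl_cons, List.foldl_nil, stepFirst, PySem.List.pyGetD_natCast]
    have hcontains :
        ((PySem.List.pyRange 0 (m : Int)).foldl (stepFirst cs) PySem.Dict.empty).contains
            (cs.getD m ' ')
          = decide (cs.getD m ' ' ∈ cs.take m) := by
      rw [PySem.Dict.contains_eq_decide_mem_keys, ihk]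
      exact decide_eq_decide.mpr (PySem.Set.mem_ofList _ _)
    by_cases hmem : cs.getD m ' ' ∈ cs.take m
    · have hct :
          ((PySem.List.pyRange 0 (m : Int)).foldl (stepFirst cs) PySem.Dict.empty).contains
              (cs.getD m ' ') = true := by
        rw [hcontains]; exact decide_eq_true hmem
      simp only [hct, Bool.true_eq_false, if_false]
      constructor
      · rw [take_succ_getD cs m hml, set_ofList_append_singleton,
          set_add_of_mem _ _ ((PySem.Set.mem_ofList _ _).mpr hmem)]
        exact ihk
      · intro c hc
        rw [take_succ_getD cs m hml] at hc
        have hcm : c ∈ cs.take m := by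
          rcases List.mem_append.mp hc with h' | h'
          · exact h'
          · simpa [show c = cs.getD m ' ' by simpa using h'] using hmem
        rw [ihv c hcm]
        simp only [fIa]
        rw [if_neg (by tauto)]
    · have hcf :
          ((PySem.List.pyRange 0 (m : Int)).foldl (stepFirst cs) PySem.Dict.empty).contains
              (cs.getD m ' ') = false := by
        rw [hcontains]; exact decide_eq_false hmem
      simp only [hcf, if_true]
      constructor
      · rw [PySem.Dict.keys_insert_of_not_contains _ _ hcf, ihk,
          take_succ_getD cs m hml, set_ofList_append_singleton,
          set_add_of_not_mem _ _ (fun hx => hmem ((PySem.Set.mem_ofList _ _).mp hx))]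
      · intro c hc
        rw [take_succ_getD cs m hml] at hc
        rw [PySem.Dict.get?_insert]
        split_ifs with hceq
        · simp only [fIa]
          rw [if_pos ⟨hceq, by rw [hceq]; exact hmem⟩]
        · have hcm : c ∈ cs.take m := by
            rcases List.mem_append.mp hc with h' | h'
            · exact h'
            · exact absurd (by simpa using h') hceq
          rw [ihv c hcm]
          simp only [fIa]
          rw [if_neg (by tauto)]

lemma aInv (cs : List Char) :
    ∀ (m : Nat), m ≤ cs.length →
      ((PySem.List.pyRange 0 (m : Int)).foldl (stepA cs (cs.length : Int))
          PySem.Dict.empty).keys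
          = PySem.Set.ofList (cs.take m)
        ∧ ∀ c ∈ cs.take m,
          ((PySem.List.pyRange 0 (m : Int)).foldl (stepA cs (cs.length : Int))
              PySem.Dict.empty).get? c
            = some (fIa cs c m, lIa cs c cs.length) := by
  intro m
  induction m with
  | zero =>
    intro _
    constructor
    · rfl
    · intro c hc; simp at hc
  | succ m ih =>
    intro hm
    have hml : m < cs.length := hm
    obtain ⟨ihk, ihv⟩ := ih (by omega)
    have he : innerE cs (cs.length : Int) (m : Int) = lIa cs (cs.getD m ' ') cs.length := by
      rw [innerE_eq_eA cs cs.length (m : Int)]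
      rw [PySem.List.pyGetD_natCast]
      exact eA_eq_lIa cs (cs.getD m ' ') m rfl cs.length hml
    rw [pyRange_zero_succ, List.foldl_append]
    simp only [List.foldl_cons, List.foldl_nil, stepA, PySem.List.pyGetD_natCast]
    have hcontains :
        ((PySem.List.pyRange 0 (m : Int)).foldl (stepA cs (cs.length : Int))
            PySem.Dict.empty).contains (cs.getD m ' ')
          = decide (cs.getD m ' ' ∈ cs.take m) := by
      rw [PySem.Dict.contains_eq_decide_mem_keys, ihk]
      exact decide_eq_decide.mpr (PySem.Set.mem_ofList _ _)
    by_cases hmem : cs.getD m ' ' ∈ cs.take m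
    · have hct :
          ((PySem.List.pyRange 0 (m : Int)).foldl (stepA cs (cs.length : Int))
              PySem.Dict.empty).contains (cs.getD m ' ') = true := by
        rw [hcontains]; exact decide_eq_true hmem
      simp only [hct, Bool.true_eq_false, if_false]
      have hgetD1 :
          (((PySem.List.pyRange 0 (m : Int)).foldl (stepA cs (cs.length : Int))
              PySem.Dict.empty).getD (cs.getD m ' ') (0, 0)).1
            = fIa cs (cs.getD m ' ') m := by
        rw [PySem.Dict.getD_eq_get?_getD, ihv _ hmem]; rfl
      have hgetD2 :
          (((PySem.List.pyRange 0 (m : Int)).foldl (stepA cs (cs.length : Int))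
              PySem.Dict.empty).getD (cs.getD m ' ') (0, 0)).2
            = lIa cs (cs.getD m ' ') cs.length := by
        rw [PySem.Dict.getD_eq_get?_getD, ihv _ hmem]; rfl
      rw [hgetD1, hgetD2, he]
      have hflt := fIa_lt cs (cs.getD m ' ') m hmem
      rw [if_neg (by omega)]
      constructor
      · rw [take_succ_getD cs m hml, set_ofList_append_singleton,
          set_add_of_mem _ _ ((PySem.Set.mem_ofList _ _).mpr hmem)]
        exact ihk
      · intro c hc
        rw [take_succ_getD cs m hml] at hc
        have hcm : c ∈ cs.take m := by
          rcases List.mem_append.mp hc with h' | h'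
          · exact h'
          · simpa [show c = cs.getD m ' ' by simpa using h'] using hmem
        rw [ihv c hcm]
        simp only [fIa]
        rw [if_neg (by tauto)]
    · have hcf :
          ((PySem.List.pyRange 0 (m : Int)).foldl (stepA cs (cs.length : Int))
              PySem.Dict.empty).contains (cs.getD m ' ') = false := by
        rw [hcontains]; exact decide_eq_false hmem
      simp only [hcf, if_true]
      constructor
      · rw [PySem.Dict.keys_insert_of_not_contains _ _ hcf, ihk,
          take_succ_getD cs m hml, set_ofList_append_singleton,
          set_add_of_not_mem _ _ (fun hx => hmem ((PySem.Set.mem_ofList _ _).mp hx))]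
      · intro c hc
        rw [take_succ_getD cs m hml] at hc
        rw [PySem.Dict.get?_insert]
        split_ifs with hceq
        · simp [fIa, he, hceq]
          intro hx
          exact absurd hx (by simpa using hmem)
        · have hcm : c ∈ cs.take m := by
            rcases List.mem_append.mp hc with h' | h'
            · exact h'
            · exact absurd (by simpa using h') hceq
          rw [ihv c hcm]
          simp only [fIa]
          rw [if_neg (by tauto)]

lemma sel_mem (body : Int × Option Char → Char → Int × Option Char)
    (hbody : ∀ tm k, body tm k = tm ∨ (body tm k).2 = some k) :
    ∀ (l : List Char) (init : Int × Option Char) (m : Char),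
      (l.foldl body init).2 = some m → init.2 = some m ∨ m ∈ l := by
  intro l
  induction l with
  | nil => intro init m h; exact Or.inl h
  | cons x t ih =>
    intro init m h
    rcases ih (body init x) m h with h' | h'
    · rcases hbody init x with hb | hb
      · rw [hb] at h'; exact Or.inl h'
      · rw [hb] at h'
        have hxm : x = m := Option.some_inj.mp h'
        exact Or.inr (List.mem_cons.mpr (Or.inl hxm.symm))
    · exact Or.inr (List.mem_cons_of_mem x h')

-- ===== VERDICT (by name: the statement is the Claim_ definition above) =====
theorem solution_spec : Claim_equal_solution := by
  intro s _dom _pre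
  unfold Spec_solution
  show solution s = solution_alt s
  simp only [solution, solution_alt]
  rw [PySem.List.foldl_prod_mk (f := stepFirst s.toList) (g := stepLast s.toList)]
  set cs := s.toList with hcs
  obtain ⟨hAk, hAv⟩ := aInv cs cs.length le_rfl
  obtain ⟨hFk, hFv⟩ := firstInv cs cs.length le_rfl
  have hLv := lastInv cs cs.length le_rfl
  rw [List.take_length] at hAk hAv hFk hFv hLv
  set D := (PySem.List.pyRange 0 (cs.length : Int)).foldl (stepA cs (cs.length : Int))
    PySem.Dict.empty with hD
  set F := (PySem.List.pyRange 0 (cs.length : Int)).foldl (stepFirst cs)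
    PySem.Dict.empty with hFdef
  set L := (PySem.List.pyRange 0 (cs.length : Int)).foldl (stepLast cs)
    PySem.Dict.empty with hLdef
  have hselA :
      D.keys.foldl (selA D) ((0 : Int), (none : Option Char))
        = (PySem.Set.ofList cs).foldl (selStep cs cs.length)
            ((0 : Int), (none : Option Char)) := by
    rw [hAk]
    apply PySem.List.foldl_congr_mem
    intro acc k hk
    have hkcs : k ∈ cs := (PySem.Set.mem_ofList _ _).mp hk
    have h1 : D.getD k (0, 0) = (fIa cs k cs.length, lIa cs k cs.length) := by
      rw [PySem.Dict.getD_eq_get?_getD, hAv k hkcs]; rfl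
    simp only [selA, selStep, h1]
  have hselB :
      F.keys.foldl (selB F L) ((0 : Int), (none : Option Char))
        = (PySem.Set.ofList cs).foldl (selStep cs cs.length)
            ((0 : Int), (none : Option Char)) := by
    rw [hFk]
    apply PySem.List.foldl_congr_mem
    intro acc k hk
    have hkcs : k ∈ cs := (PySem.Set.mem_ofList _ _).mp hk
    have h1 : F.getD k 0 = fIa cs k cs.length := by
      rw [PySem.Dict.getD_eq_get?_getD, hFv k hkcs]; rfl
    have h2 : L.getD k 0 = lIa cs k cs.length := hLv k hkcs
    simp only [selB, selStep, h1, h2]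
  rw [hselA, hselB]
  rcases hg : ((PySem.Set.ofList cs).foldl (selStep cs cs.length)
      ((0 : Int), (none : Option Char))).2 with _ | m
  · rfl
  · have hbody : ∀ tm k, selStep cs cs.length tm k = tm
        ∨ (selStep cs cs.length tm k).2 = some k := by
      intro tm k
      unfold selStep
      split_ifs
      · exact Or.inr rfl
      · exact Or.inl rfl
    have hmem : m ∈ cs := by
      rcases sel_mem _ hbody (PySem.Set.ofList cs) _ m hg with h | h
      · exact absurd h (by simp)
      · exact (PySem.Set.mem_ofList _ _).mp h
    have h1 : D.getD m (0, 0) = (fIa cs m cs.length, lIa cs m cs.length) := by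
      rw [PySem.Dict.getD_eq_get?_getD, hAv m hmem]; rfl
    have h2 : F.getD m 0 = fIa cs m cs.length := by
      rw [PySem.Dict.getD_eq_get?_getD, hFv m hmem]; rfl
    have h3 : L.getD m 0 = lIa cs m cs.length := hLv m hmem
    have h1a : (D.getD m (0, 0)).1 = fIa cs m cs.length := by rw [h1]
    have h1b : (D.getD m (0, 0)).2 = lIa cs m cs.length := by rw [h1]
    show String.ofList (PySem.List.slice cs (some (D.getD m (0, 0)).1)
          (some (1 + (D.getD m (0, 0)).2)))
        = String.ofList (PySem.List.slice cs (some (F.getD m 0)) (some (L.getD m 0 + 1)))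
    rw [h1a, h1b, h2, h3, Int.add_comm 1 (lIa cs m cs.length)]
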